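-- pv_equiv track=rewrite | github.com/vizgrams/vizgrams | engine/function_registry.py | _render_format_date_clickhouse
-- ===== SOURCE A (Python) =====
-- _JAVA_TOKENS_CH: list[tuple[str, str]] = [
--     ("MMMM", "%B"),
--     ("MMM",  "%b"),
--     ("EEEE", "%A"),
--     ("yyyy", "%Y"),
--     ("DDD",  "%j"),
--     ("MM",   "%m"),
--     ("HH",   "%H"),
--     ("dd",   "%d"),
--     ("mm",   "%M"),
--     ("ss",   "%S"),
--     ("yy",   "%y"),
--     ("E",    "%a"),
-- ]
--
-- def _render_format_date_clickhouse(args: list[str], kwargs: dict) -> str: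
--     col_sql = args[0]
--     pattern = str(kwargs["pattern"])
--     fmt = ""
--     i = 0
--     while i < len(pattern):
--         for token, directive in _JAVA_TOKENS_CH:
--             if pattern[i:i + len(token)] == token:
--                 fmt += directive
--                 i += len(token)
--                 break
--         else:
--             fmt += pattern[i]
--             i += 1
--     return f"formatDateTime(parseDateTimeBestEffort(substr({col_sql}, 1, 19)), '{fmt}')"
-- ===== SOURCE B (Python) =====
-- _RUNS_CH = {
--     "M": ((4, "%B"), (3, "%b"), (2, "%m")),
--     "E": ((4, "%A"), (1, "%a")),
--     "y": ((4, "%Y"), (2, "%y")),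
--     "D": ((3, "%j"),),
--     "H": ((2, "%H"),),
--     "d": ((2, "%d"),),
--     "m": ((2, "%M"),),
--     "s": ((2, "%S"),),
-- }
--
-- def _render_format_date_clickhouse(args: list, kwargs: dict) -> str:
--     col_sql = args[0]
--     pattern = str(kwargs["pattern"])
--     pieces = []
--     i = 0
--     n = len(pattern)
--     while i < n:
--         c = pattern[i]
--         j = i + 1
--         while j < n and pattern[j] == c:
--             j += 1
--         run = j - i
--         for length, directive in _RUNS_CH.get(c, ()):
--             pieces.append(directive * (run // length))
--             run %= length
--         pieces.append(c * run)
--         i = j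
--     fmt = "".join(pieces)
--     return f"formatDateTime(parseDateTimeBestEffort(substr({col_sql}, 1, 19)), '{fmt}')"
-- ===== Notes on version B (the rewrite author's own statement) =====
-- stated objective: alternative
-- what changed: B replaces A's per-position scan over the 12-token list (one slice comparison per token per index) by a run-length pass: it groups the pattern into maximal runs of one character and converts each run's length with divmod arithmetic against the (length, directive) table for that character.
import Mathlib
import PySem

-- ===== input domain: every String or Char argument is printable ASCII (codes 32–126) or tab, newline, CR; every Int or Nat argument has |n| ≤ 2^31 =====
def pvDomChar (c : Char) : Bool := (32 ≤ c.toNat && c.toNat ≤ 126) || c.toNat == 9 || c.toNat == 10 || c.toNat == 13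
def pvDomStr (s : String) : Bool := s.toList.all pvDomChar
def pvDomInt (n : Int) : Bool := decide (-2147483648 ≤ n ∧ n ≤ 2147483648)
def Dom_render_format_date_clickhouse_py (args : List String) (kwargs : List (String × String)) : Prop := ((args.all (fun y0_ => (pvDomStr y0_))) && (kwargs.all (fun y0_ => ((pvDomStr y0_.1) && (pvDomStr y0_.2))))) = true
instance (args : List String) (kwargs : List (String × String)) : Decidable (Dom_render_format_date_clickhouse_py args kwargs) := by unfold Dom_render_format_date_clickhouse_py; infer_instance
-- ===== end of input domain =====

-- B translates the Java date pattern with a run-length pass (maximal runs of one character,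
-- converted by divmod arithmetic) instead of A's per-position scan over the 12-token list.

-- ===== PORT A =====
def tokensCH : List (List Char × List Char) :=
  [ (['M','M','M','M'], ['%','B']), (['M','M','M'], ['%','b']), (['E','E','E','E'], ['%','A']),
    (['y','y','y','y'], ['%','Y']), (['D','D','D'], ['%','j']), (['M','M'], ['%','m']),
    (['H','H'], ['%','H']), (['d','d'], ['%','d']), (['m','m'], ['%','M']),
    (['s','s'], ['%','S']), (['y','y'], ['%','y']), (['E'], ['%','a']) ]

def findTok (rem : List Char) : List (List Char × List Char) → Option (List Char × Nat)
  | [] => none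
  | (t, d) :: ts => if rem.take t.length = t then some (d, t.length) else findTok rem ts

theorem findTok_pos' {rem : List Char} {d : List Char} {L : Nat} :
    ∀ ts : List (List Char × List Char), (∀ p ∈ ts, p.1 ≠ []) →
      findTok rem ts = some (d, L) → 0 < L := by
  intro ts
  induction ts with
  | nil => intro _ h; simp [findTok] at h
  | cons p ts ih =>
    obtain ⟨t, dd⟩ := p
    intro hne h
    rw [findTok] at h
    split_ifs at h with hc
    · have ht : t ≠ [] := hne (t, dd) List.mem_cons_self
      cases h
      cases t <;> simp_all
    · exact ih (fun q hq => hne q (List.mem_cons_of_mem _ hq)) h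

theorem findTok_pos {rem : List Char} {d : List Char} {L : Nat}
    (h : findTok rem tokensCH = some (d, L)) : 0 < L :=
  findTok_pos' tokensCH (by decide) h

def loopA : List Char → List Char
  | [] => []
  | c :: rest =>
    match h : findTok (c :: rest) tokensCH with
    | some (d, L) => d ++ loopA ((c :: rest).drop L)
    | none => c :: loopA rest
termination_by l => l.length
decreasing_by
  · have := findTok_pos h
    simp only [List.length_drop, List.length_cons]
    omega
  · simp


def render_format_date_clickhouse_py (args : List String) (kwargs : List (String × String)) : String :=
  let col_sql := PySem.List.pyGetD args 0 ""      -- args[0]; Pre_ guarantees args ≠ []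
  let pattern := ((kwargs.find? (fun p => p.1 = "pattern")).map Prod.snd).getD ""  -- kwargs["pattern"]; Pre_ guarantees the key is present
  let fmt := loopA pattern.toList
  "formatDateTime(parseDateTimeBestEffort(substr(" ++ col_sql ++ ", 1, 19)), '" ++ String.ofList fmt ++ "')"

-- ===== PORT B =====
def runsOf (c : Char) : List (Nat × List Char) :=
  if c = 'M' then [(4, ['%','B']), (3, ['%','b']), (2, ['%','m'])]
  else if c = 'E' then [(4, ['%','A']), (1, ['%','a'])]
  else if c = 'y' then [(4, ['%','Y']), (2, ['%','y'])]
  else if c = 'D' then [(3, ['%','j'])]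
  else if c = 'H' then [(2, ['%','H'])]
  else if c = 'd' then [(2, ['%','d'])]
  else if c = 'm' then [(2, ['%','M'])]
  else if c = 's' then [(2, ['%','S'])]
  else []

def divmodFold (c : Char) : List (Nat × List Char) → Nat → List Char
  | [], run => List.replicate run c
  | (L, d) :: ls, run => (List.replicate (run / L) d).flatten ++ divmodFold c ls (run % L)

def loopB : List Char → List Char
  | [] => []
  | c :: rest =>
    let k := (rest.takeWhile (fun x => x == c)).length
    divmodFold c (runsOf c) (k + 1) ++ loopB (rest.drop k)
termination_by l => l.length
decreasing_by
  simp only [List.length_drop, List.length_cons]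
  omega


def render_format_date_clickhouse_py_alt (args : List String) (kwargs : List (String × String)) : String :=
  let col_sql := PySem.List.pyGetD args 0 ""
  let pattern := ((kwargs.find? (fun p => p.1 = "pattern")).map Prod.snd).getD ""
  let fmt := loopB pattern.toList
  "formatDateTime(parseDateTimeBestEffort(substr(" ++ col_sql ++ ", 1, 19)), '" ++ String.ofList fmt ++ "')"

-- ===== PRECONDITION & SPEC =====
-- A raises IndexError on args = [] and KeyError when kwargs has no "pattern" key; exactly those inputs are excluded.
def Pre_render_format_date_clickhouse_py (args : List String) (kwargs : List (String × String)) : Prop :=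
  args ≠ [] ∧ (kwargs.find? (fun p => p.1 = "pattern")).isSome = true
instance (args : List String) (kwargs : List (String × String)) : Decidable (Pre_render_format_date_clickhouse_py args kwargs) := by unfold Pre_render_format_date_clickhouse_py; infer_instance

def pvWitness_render_format_date_clickhouse_py : List String × (List (String × String)) :=
  (["t.col"], [("pattern", "yyyy-MM-dd HH:mm:ss")])

def Spec_render_format_date_clickhouse_py (args : List String) (kwargs : List (String × String)) (out : String) : Prop := out = render_format_date_clickhouse_py_alt args kwargs
instance (args : List String) (kwargs : List (String × String)) (out : String) : Decidable (Spec_render_format_date_clickhouse_py args kwargs out) := by unfold Spec_render_format_date_clickhouse_py; infer_instance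

-- ===== CLAIM (what is proved, stated in full; the proofs are below) =====
def Claim_equal_render_format_date_clickhouse_py : Prop := ∀ (args : List String) (kwargs : List (String × String)), Dom_render_format_date_clickhouse_py args kwargs → Pre_render_format_date_clickhouse_py args kwargs → Spec_render_format_date_clickhouse_py args kwargs (render_format_date_clickhouse_py args kwargs)

-- ===== LEMMAS AND PROOFS =====
def pick (ls : List (Nat × List Char)) (n : Nat) : Option (Nat × List Char) :=
  ls.find? (fun p => decide (0 < p.1) && decide (p.1 ≤ n))

theorem pick_mem_bounds {ls : List (Nat × List Char)} {n L : Nat} {d : List Char}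
    (h : pick ls n = some (L, d)) : 0 < L ∧ L ≤ n := by
  have := List.find?_some h
  simp at this
  exact this

def greedy (ls : List (Nat × List Char)) (c : Char) : Nat → List Char
  | 0 => []
  | n + 1 =>
    match h : pick ls (n + 1) with
    | some (L, d) => d ++ greedy ls c (n + 1 - L)
    | none => c :: greedy ls c n
termination_by n => n
decreasing_by
  · have := pick_mem_bounds h
    omega
  · omega

theorem take_run {c tc : Char} {n L : Nat} {rest' : List Char}
    (hn : 0 < n) (hL : 0 < L) (hhead : rest'.head? ≠ some c) :
    ((List.replicate n c ++ rest').take L = List.replicate L tc) ↔ (tc = c ∧ L ≤ n) := by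
  constructor
  · intro h
    have htc : tc = c := by
      have h0 := congrArg List.head? h
      rw [List.head?_take, if_neg (by omega : ¬ L = 0), List.head?_append,
        List.head?_replicate, if_neg (by omega : ¬ n = 0), List.head?_replicate,
        if_neg (by omega : ¬ L = 0)] at h0
      simp [Option.or] at h0
      exact h0.symm
    subst htc
    refine ⟨rfl, ?_⟩
    by_contra hLn
    push_neg at hLn
    rw [List.take_append, List.take_replicate, min_eq_right (by omega : n ≤ L)] at h
    have hd := congrArg (List.drop n) h
    rw [List.drop_append, List.drop_replicate, List.drop_replicate] at hd
    simp at hd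
    have hh := congrArg List.head? hd
    rw [List.head?_take, if_neg (by omega : ¬ L - n = 0), List.head?_replicate,
      if_neg (by omega : ¬ L - n = 0)] at hh
    exact hhead hh
  · rintro ⟨rfl, hLn⟩
    rw [List.take_append_of_le_length (by simpa using hLn), List.take_replicate, min_eq_left hLn]

theorem findTok_run {c : Char} {n : Nat} {rest' : List Char}
    (hn : 0 < n) (hhead : rest'.head? ≠ some c) :
    findTok (List.replicate n c ++ rest') tokensCH
      = (pick (runsOf c) n).map (fun p => (p.2, p.1)) := by
  rw [show tokensCH = [ ((List.replicate 4 'M'), ['%','B']),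
    ((List.replicate 3 'M'),     ['%','b']),
    ((List.replicate 4 'E'), ['%','A']),
    ((List.replicate 4 'y'), ['%','Y']),
    ((List.replicate 3 'D'),     ['%','j']),
    ((List.replicate 2 'M'),         ['%','m']),
    ((List.replicate 2 'H'),         ['%','H']),
    ((List.replicate 2 'd'),         ['%','d']),
    ((List.replicate 2 'm'),         ['%','M']),
    ((List.replicate 2 's'),         ['%','S']),
    ((List.replicate 2 'y'),         ['%','y']),
    ((List.replicate 1 'E'),             ['%','a']) ] from rfl]
  simp only [findTok, List.length_replicate]
  simp only [take_run hn (by norm_num : (0:Nat) < 4) hhead,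
    take_run hn (by norm_num : (0:Nat) < 3) hhead,
    take_run hn (by norm_num : (0:Nat) < 2) hhead,
    take_run hn (by norm_num : (0:Nat) < 1) hhead]
  by_cases hM : c = 'M'
  · subst hM
    simp only [runsOf, pick]
    simp
    all_goals split_ifs <;> simp_all
  by_cases hE : c = 'E'
  · subst hE
    simp only [runsOf, pick]
    simp
    all_goals split_ifs <;> simp_all
  by_cases hy : c = 'y'
  · subst hy
    simp only [runsOf, pick]
    simp
    all_goals split_ifs <;> simp_all
  by_cases hD : c = 'D'
  · subst hD
    simp only [runsOf, pick]
    simp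
    all_goals split_ifs <;> simp_all
  by_cases hH : c = 'H'
  · subst hH
    simp only [runsOf, pick]
    simp
    all_goals split_ifs <;> simp_all
  by_cases hd : c = 'd'
  · subst hd
    simp only [runsOf, pick]
    simp
    all_goals split_ifs <;> simp_all
  by_cases hm : c = 'm'
  · subst hm
    simp only [runsOf, pick]
    simp
    all_goals split_ifs <;> simp_all
  by_cases hs : c = 's'
  · subst hs
    simp only [runsOf, pick]
    simp
    all_goals split_ifs <;> simp_all
  · simp only [runsOf, pick]
    simp [hM, hE, hy, hD, hH, hd, hm, hs, Ne.symm hM, Ne.symm hE, Ne.symm hy, Ne.symm hD,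
      Ne.symm hH, Ne.symm hd, Ne.symm hm, Ne.symm hs]


theorem loopA_cons_some {c : Char} {rest d : List Char} {L : Nat}
    (h : findTok (c :: rest) tokensCH = some (d, L)) :
    loopA (c :: rest) = d ++ loopA ((c :: rest).drop L) := by
  rw [loopA]
  split
  · next d' L' h' => rw [h'] at h; cases h; rfl
  · next h' => rw [h'] at h; cases h

theorem loopA_cons_none {c : Char} {rest : List Char}
    (h : findTok (c :: rest) tokensCH = none) :
    loopA (c :: rest) = c :: loopA rest := by
  rw [loopA]
  split
  · next d' L' h' => rw [h'] at h; cases h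
  · next h' => rfl

theorem greedy_succ_some {ls : List (Nat × List Char)} {c : Char} {n L : Nat} {d : List Char}
    (hp : pick ls (n + 1) = some (L, d)) :
    greedy ls c (n + 1) = d ++ greedy ls c (n + 1 - L) := by
  rw [greedy]
  split
  · next L' d' h' => rw [h'] at hp; cases hp; rfl
  · next h' => rw [h'] at hp; cases hp

theorem greedy_succ_none {ls : List (Nat × List Char)} {c : Char} {n : Nat}
    (hp : pick ls (n + 1) = none) :
    greedy ls c (n + 1) = c :: greedy ls c n := by
  rw [greedy]
  split
  · next L' d' h' => rw [h'] at hp; cases hp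
  · next h' => rfl

theorem A_run (c : Char) (rest' : List Char) (hhead : rest'.head? ≠ some c) :
    ∀ n, loopA (List.replicate n c ++ rest') = greedy (runsOf c) c n ++ loopA rest' := by
  intro n
  induction n using Nat.strong_induction_on with
  | _ n IH =>
    match n with
    | 0 => simp [greedy]
    | Nat.succ m =>
      have e := findTok_run (c := c) (rest' := rest') (Nat.succ_pos m) hhead
      cases hp : pick (runsOf c) (m + 1) with
      | some p =>
        obtain ⟨L, d⟩ := p
        have hb := pick_mem_bounds hp
        rw [hp, Option.map_some] at e
        rw [List.replicate_succ, List.cons_append,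
          loopA_cons_some (by rw [← List.cons_append, ← List.replicate_succ]; exact e),
          ← List.cons_append, ← List.replicate_succ]
        have hdrop : (List.replicate (m + 1) c ++ rest').drop L
            = List.replicate (m + 1 - L) c ++ rest' := by
          rw [List.drop_append, List.drop_replicate, List.length_replicate,
            (by omega : L - (m + 1) = 0), List.drop_zero]
        rw [hdrop, IH (m + 1 - L) (by omega), greedy_succ_some hp]
        simp
      | none =>
        rw [hp, Option.map_none] at e
        rw [List.replicate_succ, List.cons_append,
          loopA_cons_none (by rw [← List.cons_append, ← List.replicate_succ]; exact e),
          IH m (by omega), greedy_succ_none hp]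
        simp

theorem greedy_skip {L : Nat} {d : List Char} {ls : List (Nat × List Char)} {c : Char} :
    ∀ n, n < L → greedy ((L, d) :: ls) c n = greedy ls c n := by
  intro n
  induction n using Nat.strong_induction_on with
  | _ n IH =>
    match n with
    | 0 => intro _; rw [greedy, greedy]
    | Nat.succ m =>
      intro hm
      have hskip : pick ((L, d) :: ls) (m + 1) = pick ls (m + 1) := by
        have hb : (decide (0 < L) && decide (L ≤ m + 1)) = false := by
          simp only [Bool.and_eq_false_iff, decide_eq_false_iff_not]
          omega
        unfold pick
        rw [List.find?, hb]
      cases hp : pick ls (m + 1) with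
      | some p =>
        obtain ⟨L', d'⟩ := p
        have hb := pick_mem_bounds hp
        rw [greedy_succ_some (hskip.trans hp), greedy_succ_some hp,
          IH (m + 1 - L') (by omega) (by omega)]
      | none =>
        rw [greedy_succ_none (hskip.trans hp), greedy_succ_none hp, IH m (by omega) (by omega)]

theorem greedy_nil (c : Char) : ∀ n, greedy [] c n = List.replicate n c := by
  intro n
  induction n with
  | zero => rw [greedy]; rfl
  | succ m IH =>
    rw [greedy_succ_none (by unfold pick; rw [List.find?]), IH, List.replicate_succ]

theorem greedy_cons {L : Nat} {d : List Char} {ls : List (Nat × List Char)} {c : Char}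
    (hL : 0 < L) :
    ∀ n, greedy ((L, d) :: ls) c n
      = (List.replicate (n / L) d).flatten ++ greedy ls c (n % L) := by
  intro n
  induction n using Nat.strong_induction_on with
  | _ n IH =>
    by_cases hn : n < L
    · rw [Nat.div_eq_of_lt hn, Nat.mod_eq_of_lt hn, greedy_skip n hn]
      simp
    · push_neg at hn
      obtain ⟨m, rfl⟩ : ∃ m, n = m + 1 := ⟨n - 1, by omega⟩
      have hp : pick ((L, d) :: ls) (m + 1) = some (L, d) := by
        have hb : (decide (0 < L) && decide (L ≤ m + 1)) = true := by
          simp only [Bool.and_eq_true, decide_eq_true_eq]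
          omega
        unfold pick
        rw [List.find?, hb]
      rw [greedy_succ_some hp, IH (m + 1 - L) (by omega)]
      have hdiv : (m + 1) / L = (m + 1 - L) / L + 1 := by
        conv_lhs => rw [← Nat.sub_add_cancel hn]
        rw [Nat.add_div_right _ hL]
      have hmod : (m + 1 - L) % L = (m + 1) % L := by
        conv_rhs => rw [← Nat.sub_add_cancel hn]
        rw [Nat.add_mod_right]
      rw [hdiv, hmod, List.replicate_succ, List.flatten_cons, List.append_assoc]

theorem greedy_eq_divmod : ∀ (ls : List (Nat × List Char)) (c : Char),
    (∀ p ∈ ls, 0 < p.1) → ∀ n, greedy ls c n = divmodFold c ls n := by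
  intro ls
  induction ls with
  | nil => intro c _ n; rw [greedy_nil, divmodFold]
  | cons p ls IH =>
    obtain ⟨L, d⟩ := p
    intro c hpos n
    rw [greedy_cons (hpos (L, d) List.mem_cons_self) n, divmodFold,
      IH c (fun q hq => hpos q (List.mem_cons_of_mem _ hq)) (n % L)]

theorem runsOf_pos (c : Char) : ∀ p ∈ runsOf c, 0 < p.1 := by
  intro p hp
  unfold runsOf at hp
  split_ifs at hp
  all_goals simp at hp
  all_goals first
    | (rcases hp with rfl | rfl | rfl <;> decide)
    | (rcases hp with rfl | rfl <;> decide)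
    | (rcases hp with rfl <;> decide)

theorem loopA_eq_loopB_aux : ∀ (N : Nat) (l : List Char), l.length ≤ N → loopA l = loopB l := by
  intro N
  induction N with
  | zero =>
    intro l hl
    have : l = [] := List.length_eq_zero_iff.mp (by omega)
    subst this
    simp [loopA, loopB]
  | succ N IH =>
    intro l hl
    cases l with
    | nil => simp [loopA, loopB]
    | cons c rest =>
      set k := (rest.takeWhile (fun x => x == c)).length with hk
      set t := rest.dropWhile (fun x => x == c) with htdef
      have hrep : rest.takeWhile (fun x => x == c) = List.replicate k c := by
        rw [List.eq_replicate_iff]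
        refine ⟨hk.symm, fun b hb => ?_⟩
        have := List.mem_takeWhile_imp hb
        simpa using this
      have hsplit : rest = List.replicate k c ++ t := by
        conv_lhs => rw [← List.takeWhile_append_dropWhile (p := fun x => x == c) (l := rest)]
        rw [hrep, ← htdef]
      have hhead : t.head? ≠ some c := by
        have hw := List.head?_dropWhile_not (fun x => x == c) rest
        rw [← htdef] at hw
        intro hcontra
        rw [hcontra] at hw
        simp at hw
      have hdrop : rest.drop k = t := by
        conv_lhs => rw [hsplit]
        rw [List.drop_append, List.drop_replicate, List.length_replicate]
        simp
      have hcons : c :: rest = List.replicate (k + 1) c ++ t := by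
        rw [List.replicate_succ, List.cons_append, ← hsplit]
      have hlen2 : t.length ≤ N := by
        have hle := List.length_dropWhile_le (p := fun x => x == c) (l := rest)
        rw [← htdef] at hle
        simp at hl
        omega
      rw [loopB]
      show loopA (c :: rest) = divmodFold c (runsOf c) (k + 1) ++ loopB (rest.drop k)
      conv_lhs => rw [hcons]
      rw [A_run c t hhead, greedy_eq_divmod (runsOf c) c (runsOf_pos c), hdrop, IH t hlen2]

theorem loopA_eq_loopB (l : List Char) : loopA l = loopB l :=
  loopA_eq_loopB_aux l.length l le_rfl

-- ===== VERDICT (by name: the statement is the Claim_ definition above) =====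
theorem render_format_date_clickhouse_py_spec : Claim_equal_render_format_date_clickhouse_py := by
  intro args kwargs _ _
  show render_format_date_clickhouse_py args kwargs = render_format_date_clickhouse_py_alt args kwargs
  show "formatDateTime(parseDateTimeBestEffort(substr(" ++ PySem.List.pyGetD args 0 "" ++ ", 1, 19)), '"
      ++ String.ofList (loopA (((kwargs.find? (fun p => p.1 = "pattern")).map Prod.snd).getD "").toList) ++ "')"
    = "formatDateTime(parseDateTimeBestEffort(substr(" ++ PySem.List.pyGetD args 0 "" ++ ", 1, 19)), '"
      ++ String.ofList (loopB (((kwargs.find? (fun p => p.1 = "pattern")).map Prod.snd).getD "").toList) ++ "')"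
  rw [loopA_eq_loopB]
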